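-- pv_equiv track=rewrite | github.com/armohamm/pyscap | src/scap/model/oval_5/defs/SetElement.py | set_operator_intersection
-- ===== SOURCE A (Python) =====
-- def set_operator_intersection(item_sets):
--     ''' include all of the values common to both sets. '''
--     items = item_sets[0].copy()
--     for s in range(1, len(item_sets)):
--         new_items = []
--         for i in items:
--             if i in item_sets[s]:
--                 new_items.append(i)
--         items = new_items
--     return items
-- ===== SOURCE B (Python) =====
-- def set_operator_intersection(item_sets):
--     ''' include all of the values common to both sets. '''
--     return [i for i in item_sets[0] if all(i in s for s in item_sets[1:])]
-- ===== Notes on version B (the rewrite author's own statement) =====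
-- stated objective: simpler
-- what changed: Replaces the iterative narrowing of an accumulator list against each subsequent set with a single comprehension over the first list that keeps an element iff it is a member of every other list; no intermediate shrinking lists are built.
import Mathlib
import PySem

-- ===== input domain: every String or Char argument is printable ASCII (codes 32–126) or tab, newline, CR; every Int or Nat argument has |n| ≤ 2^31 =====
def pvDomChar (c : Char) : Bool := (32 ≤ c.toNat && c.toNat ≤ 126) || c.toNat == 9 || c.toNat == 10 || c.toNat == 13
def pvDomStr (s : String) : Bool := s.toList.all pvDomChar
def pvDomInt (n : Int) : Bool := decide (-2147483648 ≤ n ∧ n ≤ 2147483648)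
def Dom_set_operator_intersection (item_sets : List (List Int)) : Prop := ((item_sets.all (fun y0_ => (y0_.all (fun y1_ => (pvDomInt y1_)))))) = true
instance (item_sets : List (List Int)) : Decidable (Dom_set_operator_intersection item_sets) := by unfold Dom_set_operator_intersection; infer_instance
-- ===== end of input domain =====

-- B replaces A's iterative accumulator-narrowing against each set by one comprehension over
-- the first list checking membership in every other list (objective: simpler).

-- ===== PORT A =====
-- items = item_sets[0].copy(); for s in range(1, len(item_sets)): keep only items in item_sets[s]
def set_operator_intersection (item_sets : List (List Int)) : List Int :=
  let items := PySem.List.pyGetD item_sets 0 []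
  (PySem.List.pyRange 1 item_sets.length 1).foldl
    (fun items s =>
      items.foldl
        (fun new_items i =>
          if i ∈ PySem.List.pyGetD item_sets s [] then new_items ++ [i] else new_items)
        [])
    items

-- ===== PORT B =====
-- [i for i in item_sets[0] if all(i in s for s in item_sets[1:])]
def set_operator_intersection_alt (item_sets : List (List Int)) : List Int :=
  (PySem.List.pyGetD item_sets 0 []).filter
    (fun i => (PySem.List.slice item_sets (some 1) none).all (fun s => decide (i ∈ s)))

-- ===== PRECONDITION & SPEC =====
-- Pre_ excludes only the empty list of sets, on which both A and B raise IndexError (item_sets[0]).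
def Pre_set_operator_intersection (item_sets : List (List Int)) : Prop := item_sets ≠ []
instance (item_sets : List (List Int)) : Decidable (Pre_set_operator_intersection item_sets) := by unfold Pre_set_operator_intersection; infer_instance
def pvWitness_set_operator_intersection : List (List Int) := [[1, 2, 2, 3], [2, 3], [3, 2, 5]]

def Spec_set_operator_intersection (item_sets : List (List Int)) (out : List Int) : Prop := out = set_operator_intersection_alt item_sets
instance (item_sets : List (List Int)) (out : List Int) : Decidable (Spec_set_operator_intersection item_sets out) := by unfold Spec_set_operator_intersection; infer_instance

-- ===== CLAIM (what is proved, stated in full; the proofs are below) =====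
def Claim_equal_set_operator_intersection : Prop := ∀ (item_sets : List (List Int)), Dom_set_operator_intersection item_sets → Pre_set_operator_intersection item_sets → Spec_set_operator_intersection item_sets (set_operator_intersection item_sets)

-- ===== LEMMAS AND PROOFS =====

-- An index fold that only reads rest[k] in order is the fold over rest itself.
theorem foldl_range_getD {α β : Type} (g : β → α → β) (d : α) :
    ∀ (rest : List α) (init : β),
      (List.range rest.length).foldl (fun acc k => g acc (rest.getD k d)) init
        = rest.foldl g init := by
  intro rest
  induction rest using List.reverseRecOn with
  | nil => intro init; simp
  | append_singleton ys y ih =>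
      intro init
      simp only [List.length_append, List.length_singleton, List.range_succ,
        List.foldl_append, List.foldl_cons, List.foldl_nil]
      have h1 : (ys ++ [y]).getD ys.length d = y := by
        simp [List.getD]
      have h2 : List.foldl (fun acc k => g acc ((ys ++ [y]).getD k d)) init (List.range ys.length)
          = List.foldl (fun acc k => g acc (ys.getD k d)) init (List.range ys.length) := by
        apply PySem.List.foldl_congr_mem
        intro acc k hk
        have hk' : k < ys.length := List.mem_range.mp hk
        simp [List.getD, List.getElem?_append_left hk']
      rw [h1, h2, ih]
  
-- Narrowing an accumulator through each set equals filtering by membership in all sets.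
theorem foldl_narrow_eq_filter :
    ∀ (rest : List (List Int)) (items : List Int),
      rest.foldl
        (fun acc s => acc.foldl (fun ni i => if i ∈ s then ni ++ [i] else ni) [])
        items
        = items.filter (fun i => rest.all (fun s => decide (i ∈ s))) := by
  intro rest
  induction rest with
  | nil => intro items; simp
  | cons s rest ih =>
      intro items
      simp only [List.foldl_cons]
      rw [PySem.List.foldl_append_ite_eq_filter, List.nil_append, ih,
        List.filter_filter]
      congr 1
      funext i
      simp [Bool.and_comm]

theorem set_operator_intersection_spec : Claim_equal_set_operator_intersection := by
  intro item_sets _ hpre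
  unfold Spec_set_operator_intersection
  match item_sets, hpre with
  | x :: rest, _ =>
    simp only [set_operator_intersection, set_operator_intersection_alt,
      PySem.List.slice_from_one, List.tail_cons, PySem.List.pyGetD_zero_cons]
    rw [PySem.List.pyRange_one]
    have hn : (((x :: rest).length : Int) - 1).toNat = rest.length := by
      simp
    rw [hn, List.foldl_map]
    have h3 : List.foldl
        (fun (items : List Int) (k : Nat) => List.foldl
          (fun new_items i =>
            if i ∈ PySem.List.pyGetD (x :: rest) (1 + (k : Int)) [] then new_items ++ [i]
            else new_items) [] items)
        x (List.range rest.length)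
        = List.foldl
        (fun (items : List Int) (k : Nat) => List.foldl
          (fun new_items i =>
            if i ∈ rest.getD k [] then new_items ++ [i] else new_items) [] items)
        x (List.range rest.length) := by
      apply PySem.List.foldl_congr_mem
      intro acc k _
      have hcast : (1 : Int) + (k : Int) = ((k + 1 : Nat) : Int) := by push_cast; ring
      rw [hcast, PySem.List.pyGetD_natCast]
      rfl
    rw [h3,
      foldl_range_getD
        (g := fun acc s => List.foldl
          (fun new_items i => if i ∈ s then new_items ++ [i] else new_items) [] acc)
        (d := ([] : List Int)),
      foldl_narrow_eq_filter]
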